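-- pv_equiv track=rewrite | github.com/SUESTRALROPIET/TodayILearned | APS/programmers/Lv2_[3차] 방금그곡/s2.py | convert_sharp
-- ===== SOURCE A (Python) =====
-- def convert_sharp(str):     # '#' => 소문자로(string) 변환하기
--     return_lst = []
--     for ele in str:
--         if ele == '#':
--             pre = return_lst.pop()
--             converted = chr(ord(pre) + 32)
--             return_lst.append(converted)
--         else:
--             return_lst.append(ele)
--     return ''.join(return_lst)
-- ===== SOURCE B (Python) =====
-- def convert_sharp(str):
--     out = []
--     i = 0
--     n = len(str)
--     while i < n:
--         c = str[i]
--         i += 1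
--         k = 0
--         while i < n and str[i] == '#':
--             k += 1
--             i += 1
--         out.append(chr(ord(c) + 32 * k))
--     return ''.join(out)
-- ===== Notes on version B (the rewrite author's own statement) =====
-- stated objective: alternative
-- what changed: B replaces A's pop-and-mutate accumulator (append each char, pop/rewrite it on each '#') by an index-based lookahead scan that counts the run of k '#' after each character and emits chr(ord(c)+32*k) once, never editing already-emitted output. Pre_ excludes leading-'#' strings (A raises IndexError) and strings whose emitted code point is a lone surrogate or >= 0x110000 (unrepresentable as a Lean Char / chr raises); both Pythons agree on all surrogate cases, they are excluded only because Lean's String cannot hold the value.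
-- outside the precondition, e.g. on convert_sharp('#'): A raises IndexError, B returns '#'
import Mathlib
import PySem

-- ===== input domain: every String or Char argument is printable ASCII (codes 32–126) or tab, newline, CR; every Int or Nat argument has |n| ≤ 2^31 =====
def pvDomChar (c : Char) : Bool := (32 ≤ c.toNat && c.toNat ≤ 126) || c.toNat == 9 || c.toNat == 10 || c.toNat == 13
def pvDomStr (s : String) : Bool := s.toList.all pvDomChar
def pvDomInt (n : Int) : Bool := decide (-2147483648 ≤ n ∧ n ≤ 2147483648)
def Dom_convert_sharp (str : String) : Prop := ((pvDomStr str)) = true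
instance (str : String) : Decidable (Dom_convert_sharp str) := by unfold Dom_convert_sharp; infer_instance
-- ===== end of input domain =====

-- B replaces A's pop-and-mutate accumulator by a lookahead scan counting each '#'-run
-- (objective: alternative, same O(n) cost).  Equivalence is about the return value.
-- Both ports carry code points (ord values, Nats) internally and apply chr (Char.ofNat)
-- once at the end: Python's intermediate values may be lone surrogates, which Lean's Char
-- cannot hold; on Pre_ every FINAL code point is a valid scalar value, so this is exact.

-- ===== PORT A =====
-- one fold step of A's loop body over code points; the 'none' branch is Python's
-- IndexError on pop from the empty list (excluded by Pre_)
def convertStepA (return_lst : List Nat) (ele : Char) : List Nat :=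
  if ele = '#' then
    match PySem.List.pop? return_lst with
    | some (pre, rest) => rest ++ [pre + 32]
    | none => return_lst
  else
    return_lst ++ [ele.toNat]

def convert_sharp (str : String) : String :=
  String.ofList ((str.toList.foldl convertStepA []).map Char.ofNat)

-- ===== PORT B =====
-- B's while loop: take the current char, count the run of following '#', emit its
-- code once, skip the run
def convertGoB (l : List Char) : List Nat :=
  match l with
  | [] => []
  | c :: rest =>
      let k := (rest.takeWhile (fun x => x = '#')).length
      (c.toNat + 32 * k) :: convertGoB (rest.dropWhile (fun x => x = '#'))
termination_by l.length
decreasing_by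
  simp only [List.length_cons]
  exact Nat.lt_succ_of_le (List.Sublist.length_le (List.dropWhile_sublist _))

def convert_sharp_alt (str : String) : String :=
  String.ofList ((convertGoB str.toList).map Char.ofNat)

-- ===== PRECONDITION & SPEC =====
-- Pre_ excludes (1) strings starting with '#', on which A raises IndexError, and
-- (2) strings where some emitted code point (ord of a non-'#' char + 32·its following
-- '#'-run length) lands in the surrogate range 0xD800–0xDFFF — there Python returns a
-- lone-surrogate string that no Lean String can represent, so the claim cannot speak
-- about it — or at/above 0x110000, where Python's chr raises ValueError.
def Pre_convert_sharp (str : String) : Prop :=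
  str.toList.head? ≠ some '#' ∧
  ∀ i ∈ List.range str.toList.length,
    str.toList.getD i ' ' ≠ '#' →
    ((str.toList.getD i ' ').toNat
        + 32 * ((str.toList.drop (i + 1)).takeWhile (fun x => x = '#')).length < 55296 ∨
     (57344 ≤ (str.toList.getD i ' ').toNat
        + 32 * ((str.toList.drop (i + 1)).takeWhile (fun x => x = '#')).length ∧
      (str.toList.getD i ' ').toNat
        + 32 * ((str.toList.drop (i + 1)).takeWhile (fun x => x = '#')).length < 1114112))
instance (str : String) : Decidable (Pre_convert_sharp str) := by
  unfold Pre_convert_sharp; infer_instance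

def pvWitness_convert_sharp : String := "CC#DEF##G#"

def Spec_convert_sharp (str : String) (out : String) : Prop := out = convert_sharp_alt str
instance (str : String) (out : String) : Decidable (Spec_convert_sharp str out) := by
  unfold Spec_convert_sharp; infer_instance

-- ===== CLAIM (what is proved, stated in full; the proofs are below) =====
def Claim_equal_convert_sharp : Prop :=
  ∀ (str : String), Dom_convert_sharp str → Pre_convert_sharp str →
    Spec_convert_sharp str (convert_sharp str)

-- ===== LEMMAS AND PROOFS =====

lemma head?_dropWhile {α} (p : α → Bool) (l : List α) (c : α)
    (h : (l.dropWhile p).head? = some c) : p c = false := by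
  induction l with
  | nil => simp at h
  | cons x xs ih =>
      by_cases hx : p x
      · simp [hx] at h; exact ih h
      · simp [hx] at h; simpa [h] using hx

-- the '#'-run lemma: k pops-and-rewrites collapse to one +32*k emission
lemma fold_sharp_run (k : Nat) (m : Nat) (acc : List Nat) (r : List Char) :
    List.foldl convertStepA (acc ++ [m]) (List.replicate k '#' ++ r) =
      List.foldl convertStepA (acc ++ [m + 32 * k]) r := by
  induction k generalizing m with
  | zero => simp
  | succ k ih =>
      rw [List.replicate_succ, List.cons_append, List.foldl_cons]
      have hstep : convertStepA (acc ++ [m]) '#' = acc ++ [m + 32] := by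
        simp [convertStepA, PySem.List.pop?_last]
      rw [hstep, ih (m + 32)]
      congr 3
      omega

lemma fold_eq_go (n : Nat) : ∀ (l : List Char), l.length ≤ n →
    l.head? ≠ some '#' →
    ∀ acc, List.foldl convertStepA acc l = acc ++ convertGoB l := by
  induction n with
  | zero =>
      intro l hl _ acc
      have : l = [] := List.eq_nil_of_length_eq_zero (Nat.le_zero.mp hl)
      subst this; simp [convertGoB]
  | succ n ih =>
      intro l hl hhd acc
      match l with
      | [] => simp [convertGoB]
      | c :: rest =>
        have hc : c ≠ '#' := fun h => hhd (by simp [h])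
        set p : Char → Bool := fun x => x = '#' with hp
        set k := (rest.takeWhile p).length with hk
        set r := rest.dropWhile p with hr
        have hrest : rest = List.replicate k '#' ++ r := by
          conv_lhs => rw [← List.takeWhile_append_dropWhile (p := p) (l := rest)]
          congr 1
          have := List.eq_replicate_of_mem (a := '#') (l := rest.takeWhile p)
            (fun b hb => by
              have := List.mem_takeWhile_imp hb
              simpa [hp] using this)
          simpa [← hk] using this
        have hstep : convertStepA acc c = acc ++ [c.toNat] := by
          simp [convertStepA, hc]
        rw [List.foldl_cons, hstep, hrest, fold_sharp_run k c.toNat acc r]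
        have hihr : List.foldl convertStepA (acc ++ [c.toNat + 32 * k]) r =
            (acc ++ [c.toNat + 32 * k]) ++ convertGoB r := by
          apply ih r
          · have : r.length ≤ rest.length := (List.dropWhile_sublist _).length_le
            simpa using Nat.le_trans this (by simpa using Nat.le_of_succ_le_succ hl)
          · intro hbad
            have := head?_dropWhile p rest '#' (by rw [← hr]; exact hbad)
            simp [hp] at this
        rw [hihr]
        have hgo : convertGoB (c :: rest) = (c.toNat + 32 * k) :: convertGoB r := by
          rw [convertGoB]
        rw [← hrest, hgo]
        simp

-- ===== VERDICT (by name: the statements are the Claim_ definitions above) =====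
theorem convert_sharp_spec : Claim_equal_convert_sharp := by
  intro str _ hpre
  unfold Spec_convert_sharp convert_sharp convert_sharp_alt
  have := fold_eq_go str.toList.length str.toList le_rfl hpre.1 []
  rw [this]
  simp
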